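/- GENERATED by mk_final_copies.py from the proof of the farm's unit `decode_residue.2` (farm:decode_residue.2.1: Proof.lean) as the
   re-elaboration sweep compiled it — do not edit. -/
import Asan.CheckWalk
import Vorbis.Spec.Units.decode_residue_2
import Vorbis.Spec.Worked.decode_residue_2_Lemmas

open X86 X86.User Asan Vorbis Vorbis.Spec Vorbis.Spec.DecodeResidue

set_option maxRecDepth 4000
set_option maxHeartbeats 4000000

namespace Vorbis.Spec.decode_residue_2

/-- **One round of loop 2152** `for (i=0; i < ch; ++i) if (!do_not_decode[i]) memset(residue_buffers[i], 0, 4n)` from its head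
0x10ee39 (`At3`, the loop invariant; `i` is its existential), as the `body` of `ReachVia.loop`: either the loop is left
(`i ≥ ch`: 0x10ee82 … 0x10eea6, the dispatch `rtype == 2 && ch != 1` → `At8` at 0x10ef08 or `At5` at 0x10eea8), or the head is
reached again with `i + 1` (through `jne 10ee36` when `do_not_decode[i] ≠ 0`, or through the `memset` call), the measure
`ch − ebx` smaller. Three paths, two check sites (0x10ee48 ld1 `do_not_decode + i`, 0x10ee62 ld8 `residue_buffers + 8i`: P2),
one call (0x10ee7b `memset`: the buffer is a channel buffer, live, by P2). COMMON is carried by `common_frame` (Lemmas.lean):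
every store of a round goes below the steady stack pointer or into a channel buffer. -/
theorem loop_round (Lay : Layout) (hLay : Lay.hi = 0x1000000) (μ : Microarch) (hμ : UserX.MicroOK μ) (u₀ : State)
    (hcode : HasCodeNat Lay u₀ Vorbis.L.decode_residue.entry Vorbis.Code.code_decode_residue.nat Vorbis.L.decode_residue.size)
    (hload1 : Asan.SmallCheck Lay μ Vorbis.WayInv (Vorbis.CodeOK u₀) [.rax, .rdx] 1 Vorbis.L.__asan_load1_noabort.entry)
    (hload8 : Asan.SmallCheck Lay μ Vorbis.WayInv (Vorbis.CodeOK u₀) [.rax, .rcx, .rdx] 8 Vorbis.L.__asan_load8_noabort.entry)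
    (g : G)
    (hmemset : Calls Lay μ Vorbis.WayInv (Vorbis.conv u₀) Vorbis.L.memset.entry (Vorbis.Spec.memset.spec g.others' g.frames'))
    (hent : Entered u₀ g) (v : State) (hat : At3 u₀ g v) :
    ReachVia Lay μ WayInv v (fun v' => (At8 u₀ g v' ∨ At5 u₀ g v') ∨
      (At3 u₀ g v' ∧ g.ch - (v'.reg .rbx).toNat < g.ch - (v.reg .rbx).toNat)) := by
  -- 1. the ENTRY state's facts (`g.e`), from the `AtEntry` of the activation
  have he := hent.entry
  v_entry he
  -- 2. the PRESENT state's facts under names the walker keeps (`hv_…`: a `w_…` of the base state is cleared after one step)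
  have hc := hat.common
  obtain ⟨i, hile, hv_rbx⟩ := hat.i
  have hv_rip := hat.rip
  have hv_rsp := hc.rsp
  have hv_rbp := hc.rbp
  have hv_r14 := hat.r14
  have hv_r15 := hat.r15
  have w_eq : Mem.EqOn Vorbis.L.textLo Vorbis.L.textHi u₀.mem v.mem := hc.code
  have hdf : v.flags .df = false := (show abiInv _ from hc.inv).1
  have hmx : v.mxcsr &&& 0x1F80 = 0x1F80 := (show abiInv _ from hc.inv).2
  have hsse := Vorbis.sseOK_of_abiInv hc.inv
  -- 3. the slots the segment loads
  have f_rb := hc.fr_rb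
  have f_ch := hc.fr_ch
  have f_rtype := hc.fr_rtype
  have sl_r := hat.sl_r
  have sl_tap := hat.sl_tap
  have sl_n := hat.sl_n
  -- the numbers: `ch ≤ 16`, `n ≤ 4096`, the caller's two arrays above the return address
  have h16 := ch_le16 hent
  have hn := n_le4096 hent
  have eR : (g.e.reg .rsp).toNat = g.RA := rfl
  have eD : (g.e.reg .r9).toNat = g.dnd := rfl
  have eB : (g.e.reg .rsi).toNat = g.rb := rfl
  have hdst := hent.args.dnd_stack
  have hrst := hent.args.rb_stack
  -- 4. the walk: all three paths of one round
  u_walk hcode [hμ.vendor] until [Vorbis.L.decode_residue.cut3, Vorbis.L.decode_residue.cut5, Vorbis.L.decode_residue.cut8] span [Vorbis.L.textLo, Vorbis.L.textHi] side (v_side)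
  case check_10ee48 =>
    -- 0x10ee48 (C 2153): the check of `do_not_decode[i]`, `i < ch` (P2)
    have hlt : i < g.ch := by
      rw [part32_ofNat_toInt g.ch (by omega), part32_ofNat_toInt i (by omega)] at hbr_10ee3c
      omega
    rw [sext_ofNat i (by omega)]
    have hl : LiveIn g.others' g.frames' g.dnd g.ch := live_inner g hent.args.dnd_live
    have hun : ShadowUntouched v.mem s_10ee48.mem := by v_untouched
    exact hl.accSmall hc.shadow hun _ 1 (by decide) (by u_omega) (by u_omega)
  case check_10ee62 =>
    -- 0x10ee62 (C 2154): the check of `residue_buffers[i]`, `i < ch` (P2)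
    have hlt : i < g.ch := by
      rw [part32_ofNat_toInt g.ch (by omega), part32_ofNat_toInt i (by omega)] at hbr_10ee3c
      omega
    rw [sext_ofNat i (by omega)]
    have hl : LiveIn g.others' g.frames' g.rb (8 * g.ch) := live_inner g hent.args.rb_live
    have hun : ShadowUntouched v.mem s_10ee62.mem := by v_untouched
    exact hl.accSmall hc.shadow hun _ 8 (by decide) (by u_omega) (by u_omega)
  case call_inv =>
    -- DF and the MXCSR masks at `memset`'s entry: the checks kept DF, `shl` wrote status flags only
    v_inv
  case pre_10ee7b =>
    -- 0x10ee7b (C 2154): `memset(residue_buffers[i], 0, 4·n)`: the shadow layer at the call, the buffer live (P2)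
    have hlt : i < g.ch := by
      rw [part32_ofNat_toInt g.ch (by omega), part32_ofNat_toInt i (by omega)] at hbr_10ee3c
      omega
    have hun : ShadowUntouched v.mem s_10ee7b.mem := by v_untouched
    have hrsp8 : (s_10ee7b.reg .rsp).toNat + 8 = g.RA - 248 := by
      rw [w_rsp]
      u_omega
    have hsh : ShadowPre g.others' g.frames' s_10ee7b := by
      refine ⟨?_, hent.offText'⟩
      rw [hrsp8]
      exact hc.shadow.untouched hun
    -- `do_not_decode[i] = 0`
    rw [sext_ofNat i (by omega), dnd_read hent hc hlt] at hbr_10ee52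
    have hnd : ¬ DND g.e.mem g.dnd i := by
      unfold DND
      have := Mem.u8_lt g.e.mem (g.dnd + i)
      omega
    obtain ⟨k, hk, hptr, hlive⟩ := hent.args.buf i hlt hnd
    have hP : (s_10ee7b.reg .rdi).toNat = g.e.mem.ptr (g.rb + 8 * i) := by
      rw [w_rdi, sext_ofNat i (by omega), rb_read hent hc hlt, UInt64.toNat_ofNat']
      have := Mem.ptr_lt g.e.mem (g.rb + 8 * i)
      omega
    have hN : (s_10ee7b.reg .rdx).toNat = 4 * g.n := by
      rw [w_rdx]
      exact shl2_n g.n hn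
    refine ⟨hsh, Or.inr ?_⟩
    rw [hP, hN]
    apply live_inner
    have hnle := hent.args.n_le
    exact hlive.sub _ _ (Nat.le_refl _) (by omega)
  · -- 0x10eea6 taken → 0x10ef08 (C 2156): `rtype == 2 && ch != 1`, path A
    have hr32 : g.rtype < 2 ^ 32 := by
      have h := Mem.readLE_lt' v.mem (g.e.reg .rsp - 232) 4
      rw [f_rtype] at h
      omega
    have hd : ¬ (g.rtype ≠ 2 ∨ g.ch = 1) := fun h => hbr_10eea6 ((dispatch g.rtype g.ch hr32 (by omega)).mpr h)
    have hinv : abiInv s_10eea6 := by v_inv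
    have hrbp : s_10eea6.reg .rbp = g.e.reg .rsp - 8 := (w_kept.get .rbp rfl).trans hv_rbp
    have hrsp : s_10eea6.reg .rsp = g.e.reg .rsp - 248 := (w_kept.get .rsp rfl).trans hv_rsp
    refine ReachVia.done (Or.inl (Or.inl ⟨w_rip, common_exit hent hc w_mem hrbp hrsp w_eq hinv, ?_, ?_, w_r14, ?_, ?_, ?_⟩))
    · omega
    · omega
    · rw [w_r15]
      exact tap_word hat
    · rw [w_mem]
      exact hat.sl_dnd
    · rw [w_mem]
      exact hat.sl_n
  · -- 0x10eea6 not taken → 0x10eea8 (C 2156): path B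
    have hr32 : g.rtype < 2 ^ 32 := by
      have h := Mem.readLE_lt' v.mem (g.e.reg .rsp - 232) 4
      rw [f_rtype] at h
      omega
    have hd := (dispatch g.rtype g.ch hr32 (by omega)).mp hbr_10eea6
    have hinv : abiInv s_10eea6 := by v_inv
    have hrbp : s_10eea6.reg .rbp = g.e.reg .rsp - 8 := (w_kept.get .rbp rfl).trans hv_rbp
    have hrsp : s_10eea6.reg .rsp = g.e.reg .rsp - 248 := (w_kept.get .rsp rfl).trans hv_rsp
    refine ReachVia.done (Or.inl (Or.inr ⟨w_rip, common_exit hent hc w_mem hrbp hrsp w_eq hinv, hd, w_r14, ?_, ?_⟩))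
    · rw [w_r15]
      exact tap_word hat
    · rw [w_mem]
      exact hat.sl_dnd
  · -- 0x10ee52 taken → the latch 0x10ee36 → the head (C 2153: `do_not_decode[i] ≠ 0`)
    have hlt : i < g.ch := by
      rw [part32_ofNat_toInt g.ch (by omega), part32_ofNat_toInt i (by omega)] at hbr_10ee3c
      omega
    have hs : Mem.SameExcept [⟨(g.e.reg .rsp).toNat - 848, (g.e.reg .rsp).toNat - 248⟩] v.mem s_10ee36.mem := by
      u_same
    have hun : ShadowUntouched v.mem s_10ee36.mem := by v_untouched
    have hinv : abiInv s_10ee36 := by v_inv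
    have hrbp : s_10ee36.reg .rbp = g.e.reg .rsp - 8 := (w_kept.get .rbp rfl).trans hv_rbp
    have hr14 : s_10ee36.reg .r14 = UInt64.ofNat g.ch := (w_kept.get .r14 rfl).trans hv_r14
    have hr15 : s_10ee36.reg .r15 = g.e.reg .r9 := (w_kept.get .r15 rfl).trans hv_r15
    have hrbx : s_10ee36.reg .rbx = UInt64.ofNat (i + 1) := by
      rw [w_rbx]
      exact counter_succ32 i (by omega)
    refine ReachVia.done (Or.inr (at3_step hent hat hlt hs ?_ hun w_rip hrbx hrbp w_rsp hr14 hr15 w_eq hinv))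
    intro w hw
    rw [List.mem_singleton] at hw
    subst hw
    exact Or.inl ⟨Nat.le_refl _, Nat.le_refl _⟩
  · -- 0x10ee80 (C 2154): `memset` has returned; `jmp` to the latch, `++i`, the head
    have hlt : i < g.ch := by
      rw [part32_ofNat_toInt g.ch (by omega), part32_ofNat_toInt i (by omega)] at hbr_10ee3c
      omega
    rw [sext_ofNat i (by omega), dnd_read hent hc hlt] at hbr_10ee52
    have hnd : ¬ DND g.e.mem g.dnd i := by
      unfold DND
      have := Mem.u8_lt g.e.mem (g.dnd + i)
      omega
    obtain ⟨k, hk, hptr, hlive⟩ := hent.args.buf i hlt hnd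
    have hP : (s_10ee7b.reg .rdi).toNat = g.e.mem.ptr (g.rb + 8 * i) := by
      rw [w_rdi_10ee7b, sext_ofNat i (by omega), rb_read hent hc hlt, UInt64.toNat_ofNat']
      have := Mem.ptr_lt g.e.mem (g.rb + 8 * i)
      omega
    have hN : (s_10ee7b.reg .rdx).toNat = 4 * g.n := by
      rw [w_rdx_10ee7b]
      exact shl2_n g.n hn
    have hnle := hent.args.n_le
    have hnge := hent.args.n_ge
    have hin := (live_inner g hlive).inside hc.shadow (by omega)
    v_after_call w_rsp_10ee7b w_mem_10ee7b
    rw [hP, hN] at w_same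
    have hs : Mem.SameExcept [⟨(g.e.reg .rsp).toNat - 848, (g.e.reg .rsp).toNat - 248⟩,
        ⟨g.e.mem.ptr (g.rb + 8 * i), g.e.mem.ptr (g.rb + 8 * i) + 4 * g.n⟩] v.mem s_10ee7br.mem := by
      u_same
    have hun : ShadowUntouched v.mem s_10ee7br.mem := by v_untouched
    have hrbp' : s_10ee7br.reg .rbp = g.e.reg .rsp - 8 := (w_kept.get .rbp rfl).trans hv_rbp
    have hr14' : s_10ee7br.reg .r14 = UInt64.ofNat g.ch := (w_kept.get .r14 rfl).trans hv_r14
    have hr15' : s_10ee7br.reg .r15 = g.e.reg .r9 := (w_kept.get .r15 rfl).trans hv_r15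
    have hrbx' : s_10ee7br.reg .rbx = UInt64.ofNat i := (w_kept.get .rbx rfl).trans hv_rbx
    clear w_same
    u_walk hcode [hμ.vendor] until [Vorbis.L.decode_residue.cut3, Vorbis.L.decode_residue.cut5, Vorbis.L.decode_residue.cut8] span [Vorbis.L.textLo, Vorbis.L.textHi] side (v_side)
    have hinv : abiInv s_10ee36 := by v_inv
    have hrbp : s_10ee36.reg .rbp = g.e.reg .rsp - 8 := (w_kept.get .rbp rfl).trans hv_rbp
    have hr14 : s_10ee36.reg .r14 = UInt64.ofNat g.ch := (w_kept.get .r14 rfl).trans hv_r14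
    have hr15 : s_10ee36.reg .r15 = g.e.reg .r9 := (w_kept.get .r15 rfl).trans hv_r15
    have hrbx : s_10ee36.reg .rbx = UInt64.ofNat (i + 1) := by
      rw [w_rbx]
      exact counter_succ32 i (by omega)
    rw [← w_mem] at hs hun
    refine ReachVia.done (Or.inr (at3_step hent hat hlt hs ?_ hun w_rip hrbx hrbp w_rsp hr14 hr15 w_eq hinv))
    -- the two windows: the stack below the steady stack pointer, the zeroed part of channel buffer `k`
    intro w hw
    simp only [List.mem_cons, List.mem_nil_iff, or_false] at hw
    rcases hw with rfl | rfl
    · exact Or.inl ⟨Nat.le_refl _, Nat.le_refl _⟩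
    · right
      refine ⟨k, ?_, ?_, ?_⟩
      · show k < nchan g.e.mem g.f
        rw [nchan_def]
        omega
      · show stb_vorbis.channel_buffers g.e.mem g.f k ≤ g.e.mem.ptr (g.rb + 8 * i)
        omega
      · show g.e.mem.ptr (g.rb + 8 * i) + 4 * g.n ≤ stb_vorbis.channel_buffers g.e.mem g.f k + 4 * bsize g.e.mem g.f 1
        omega

end Vorbis.Spec.decode_residue_2

/-- **Segment 2 of `decode_residue`** (0x10ee36–0x10eea6; C 2152–2156): the memset loop 2152 and the dispatch
`rtype == 2 && ch != 1`, from `At3` (0x10ee39) to `At8` (0x10ef08) or `At5` (0x10eea8): `ReachVia.loop` over the round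
`loop_round`, invariant `At3`, measure `ch − ebx`. -/
theorem Vorbis.Spec.Worked.decode_residue_2_ok : Vorbis.Spec.decode_residue_2.Statement := by
  intro Lay hLay μ hμ u₀ hcode hload1 hload8 h_memset g hent v hat
  have hms := h_memset g.others' g.frames'
  exact ReachVia.loop (Inv := fun v => At3 u₀ g v) (Post := fun v' => At8 u₀ g v' ∨ At5 u₀ g v')
    (fun v => g.ch - (v.reg .rbx).toNat)
    (fun v hv => Vorbis.Spec.decode_residue_2.loop_round Lay hLay μ hμ u₀ hcode hload1 hload8 g hms hent v hv) v hat
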